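-- pv_equiv track=rewrite | github.com/buianhduc/OnClass | CovidSeason/SS1/end.py | solve
-- ===== SOURCE A (Python) =====
-- def gcd(a,b):
--
--     # Everything divides 0
--     if (b == 0):
--          return a
--     return gcd(b, a%b)
--
-- def solve(n):
--     dp = [1,2]
--     last = 2
--     for i in range(3,n+1):
--         if(dp[len(dp)-1] % i != 0):
--             dp.append((dp[len(dp)-1]*i)//gcd(dp[len(dp)-1],i))
--         else:
--             dp.append(dp[len(dp)-1])
--     return dp;
-- ===== SOURCE B (Python) =====
-- def solve(n):
--     # lcm(1..i) grows only at prime-power i, and then exactly by the prime base: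
--     # find the smallest prime factor p of i by trial division, test whether i is a
--     # power of p, and multiply the running lcm by p only in that case.
--     out = [1, 2]
--     last = 2
--     for i in range(3, n + 1):
--         p, d = i, 2
--         while d * d <= i:
--             if i % d == 0:
--                 p = d
--                 break
--             d += 1
--         q = p
--         while q < i:
--             q *= p
--         if q == i:
--             last *= p
--         out.append(last)
--     return out
-- ===== Notes on version B (the rewrite author's own statement) =====
-- stated objective: faster
-- what changed: B replaces A's per-step big-integer gcd/divide update of the running lcm by a number-theoretic rule: lcm(1..i) grows (by exactly the prime p) only when i is a prime power p^k, so B trial-divides each i with small integers and touches the big running lcm only at prime-power indices.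
import Mathlib
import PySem

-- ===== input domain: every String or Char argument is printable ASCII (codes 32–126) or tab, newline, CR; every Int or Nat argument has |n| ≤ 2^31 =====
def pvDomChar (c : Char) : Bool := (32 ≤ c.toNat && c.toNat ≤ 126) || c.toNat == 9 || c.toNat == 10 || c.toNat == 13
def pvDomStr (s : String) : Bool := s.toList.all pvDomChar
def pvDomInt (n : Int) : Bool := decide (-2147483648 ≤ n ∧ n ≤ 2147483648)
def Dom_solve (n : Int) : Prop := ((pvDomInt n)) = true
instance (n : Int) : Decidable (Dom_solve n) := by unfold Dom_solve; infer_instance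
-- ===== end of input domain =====

-- B replaces A's per-step big-integer gcd/lcm update by a number-theoretic one:
-- lcm(1..i) changes only when i is a prime power p^k, and then exactly by the factor p,
-- so B trial-divides each i (small-integer work) and multiplies the running lcm only there.
-- Objective: faster (measured); return values are identical for every n.

-- ===== PORT A =====
-- termination helper for the port of A's recursive gcd (Python % recursion)
theorem pv_mod_natAbs_lt (a b : Int) (h : ¬ b = 0) :
    (PySem.Int.mod a b).natAbs < b.natAbs := by
  rcases lt_or_gt_of_ne h with hb | hb
  · obtain ⟨h1, h2⟩ := PySem.Int.mod_neg_bounds a hb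
    have h3 := Int.natAbs_lt_natAbs_of_nonneg_of_lt (a := -(PySem.Int.mod a b)) (b := -b)
      (by omega) (by omega)
    simpa using h3
  · exact Int.natAbs_lt_natAbs_of_nonneg_of_lt (PySem.Int.mod_nonneg a hb) (PySem.Int.mod_lt a hb)

def pygcd (a b : Int) : Int :=
  if h : b = 0 then a else pygcd b (PySem.Int.mod a b)
termination_by b.natAbs
decreasing_by exact pv_mod_natAbs_lt a b h

def solve (n : Int) : List Int :=
  (PySem.List.pyRange 3 (n + 1) 1).foldl
    (fun dp i =>
      let last := PySem.List.pyGetD dp ((dp.length : Int) - 1) 0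
      if PySem.Int.mod last i ≠ 0 then
        dp ++ [PySem.Int.floordiv (last * i) (pygcd last i)]
      else
        dp ++ [last])
    [1, 2]

-- ===== PORT B =====
-- termination helper for the trial-division loop (d*d ≤ i bounds d ≤ i)
theorem pv_findP_le (i d : Int) (h : d * d ≤ i) : d ≤ i := by
  rcases le_or_gt d 0 with hd | hd
  · exact le_trans hd (le_trans (mul_self_nonneg d) h)
  · exact le_trans (le_mul_of_one_le_left hd.le (by omega)) h

theorem pv_findP_dec (i d : Int) (h : d * d ≤ i) :
    (i + 1 - (d + 1)).toNat < (i + 1 - d).toNat := by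
  have hd := pv_findP_le i d h
  rw [Int.toNat_lt_toNat (by omega)]
  omega

theorem pv_powUp_dec (i q p : Int) (h1 : q < i) (h2 : 2 ≤ p) (h3 : 1 ≤ q) :
    (i - q * p).toNat < (i - q).toNat := by
  have hq2 : q * 2 ≤ q * p := mul_le_mul_of_nonneg_left h2 (by omega)
  rw [Int.toNat_lt_toNat (by omega)]
  omega

-- `while d*d <= i: if i % d == 0: p = d; break; d += 1`, returning p (p initialised to i)
def findP (i d : Int) : Int :=
  if h : d * d ≤ i then
    (if PySem.Int.mod i d = 0 then d else findP i (d + 1))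
  else i
termination_by (i + 1 - d).toNat
decreasing_by exact pv_findP_dec i d h

-- `q = p; while q < i: q *= p` (the 2 ≤ p ∧ 1 ≤ q conjuncts are totality guards only:
-- they hold at every call B makes, where p is a smallest prime factor)
def powUp (i q p : Int) : Int :=
  if h : q < i ∧ 2 ≤ p ∧ 1 ≤ q then powUp i (q * p) p else q
termination_by (i - q).toNat
decreasing_by exact pv_powUp_dec i q p h.1 h.2.1 h.2.2

def solve_alt (n : Int) : List Int :=
  ((PySem.List.pyRange 3 (n + 1) 1).foldl
    (fun st i =>
      let p := findP i 2
      let q := powUp i p p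
      let last := if q = i then st.2 * p else st.2
      (st.1 ++ [last], last))
    ([1, 2], 2)).1

-- ===== PRECONDITION & SPEC =====
def Spec_solve (n : Int) (out : List Int) : Prop := out = solve_alt n
instance (n : Int) (out : List Int) : Decidable (Spec_solve n out) := by unfold Spec_solve; infer_instance

-- ===== CLAIM (what is proved, stated in full; the proofs are below) =====
def Claim_equal_solve : Prop := ∀ (n : Int), Dom_solve n → Spec_solve n (solve n)

-- ===== LEMMAS AND PROOFS =====

-- `M m` = lcm(1..m), the mathematical value both programs track
def M (m : Nat) : Nat := (List.range' 1 m).foldl Nat.lcm 1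

theorem M_succ (m : Nat) : M (m + 1) = Nat.lcm (M m) (m + 1) := by
  unfold M
  rw [List.range'_concat, List.foldl_append]
  simp [Nat.add_comm]

theorem M_pos (m : Nat) : 0 < M m := by
  induction m with
  | zero => decide
  | succ m ih =>
    rw [M_succ]
    exact Nat.pos_of_ne_zero (Nat.lcm_ne_zero (by omega) (by omega))

theorem dvd_M (j m : Nat) (h1 : 1 ≤ j) (h2 : j ≤ m) : j ∣ M m := by
  induction m with
  | zero => omega
  | succ m ih =>
    rw [M_succ]
    rcases Nat.lt_or_ge j (m + 1) with h | h
    · exact Dvd.dvd.trans (ih (by omega)) (Nat.dvd_lcm_left _ _)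
    · have : j = m + 1 := by omega
      subst this
      exact Nat.dvd_lcm_right _ _

theorem not_pow_dvd_lcm {p k a b : Nat} (hp : p.Prime) (ha : a ≠ 0) (hb : b ≠ 0)
    (hka : ¬ p ^ k ∣ a) (hkb : ¬ p ^ k ∣ b) : ¬ p ^ k ∣ Nat.lcm a b := by
  have hl : Nat.lcm a b ≠ 0 := Nat.lcm_ne_zero ha hb
  rw [hp.pow_dvd_iff_le_factorization ha] at hka
  rw [hp.pow_dvd_iff_le_factorization hb] at hkb
  rw [hp.pow_dvd_iff_le_factorization hl, Nat.factorization_lcm ha hb, Finsupp.sup_apply]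
  omega

theorem not_pow_dvd_M {p k m : Nat} (hp : p.Prime) (hk : 1 ≤ k) (hm : m < p ^ k) :
    ¬ p ^ k ∣ M m := by
  induction m with
  | zero =>
    intro h
    have h2 : p ^ k ≤ 1 := Nat.le_of_dvd (by decide) h
    have h3 : 2 ≤ p := hp.two_le
    have : p ^ 1 ≤ p ^ k := Nat.pow_le_pow_right (by omega) hk
    simp at this h2
    omega
  | succ m ih =>
    rw [M_succ]
    refine not_pow_dvd_lcm hp (by have := M_pos m; omega) (by omega) (ih (by omega)) ?_
    intro h
    have := Nat.le_of_dvd (by omega) h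
    omega

-- at a prime power i = p^k, lcm(1..i) = lcm(1..i-1) * p
theorem M_succ_pow {p k m : Nat} (hp : p.Prime) (hk : 1 ≤ k) (h : m + 1 = p ^ k) :
    M (m + 1) = M m * p := by
  have hp2 : 2 ≤ p := hp.two_le
  have hlt : p ^ (k - 1) < p ^ k := Nat.pow_lt_pow_right (by omega) (by omega)
  have hkk : p ^ (k - 1) * p = p ^ k := by
    rw [← Nat.pow_succ]
    congr 1
    omega
  have h1pos : 1 ≤ p ^ (k - 1) := Nat.one_le_pow _ _ (by omega)
  have h1 : p ^ (k - 1) ∣ M m := dvd_M _ _ h1pos (by omega)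
  have h2 : ¬ p ^ k ∣ M m := not_pow_dvd_M hp hk (by omega)
  set c := M m / p ^ (k - 1) with hc
  have hNc : M m = p ^ (k - 1) * c := (Nat.mul_div_cancel' h1).symm
  have hpc : ¬ p ∣ c := by
    rintro ⟨c', hc'⟩
    apply h2
    exact ⟨c', by rw [hNc, hc', ← hkk]; ring⟩
  have hgcd : Nat.gcd (M m) (m + 1) = p ^ (k - 1) := by
    rw [h, hNc, ← hkk, Nat.gcd_mul_left]
    have : Nat.gcd c p = 1 := Nat.Coprime.gcd_eq_one ((hp.coprime_iff_not_dvd.mpr hpc).symm)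
    rw [this, Nat.mul_one]
  rw [M_succ]
  rw [Nat.lcm, hgcd, h, ← hkk, hNc]
  have hpk1 : 0 < p ^ (k - 1) := Nat.one_le_pow _ _ (by omega)
  calc p ^ (k - 1) * c * (p ^ (k - 1) * p) / p ^ (k - 1)
      = p ^ (k - 1) * (c * (p ^ (k - 1) * p)) / p ^ (k - 1) := by ring_nf
    _ = c * (p ^ (k - 1) * p) := Nat.mul_div_cancel_left _ hpk1
    _ = p ^ (k - 1) * c * p := by ring

-- when i ≥ 2 is not a power of its least prime factor, i already divides lcm(1..i-1)
theorem M_succ_not_pow {m : Nat} (h2 : 2 ≤ m + 1)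
    (h : ¬ ∃ k : Nat, m + 1 = (m + 1).minFac ^ k) : M (m + 1) = M m := by
  set i := m + 1 with hi
  have hi0 : i ≠ 0 := by omega
  have hi1 : i ≠ 1 := by omega
  set p := i.minFac with hpdef
  have hp : p.Prime := Nat.minFac_prime hi1
  have hpd : p ∣ i := Nat.minFac_dvd i
  set k := i.factorization p with hk
  have hk1 : 1 ≤ k := hp.factorization_pos_of_dvd hi0 hpd
  set a := p ^ k with ha
  set b := i / p ^ k with hb
  have hab : a * b = i := Nat.ordProj_mul_ordCompl_eq_self i p
  have hcop : Nat.Coprime a b := (Nat.coprime_ordCompl hp hi0).pow_left k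
  have ha2 : 2 ≤ a := le_trans hp.two_le (Nat.le_self_pow (by omega) p)
  have hb1 : b ≠ 1 := by
    intro hb1
    exact h ⟨k, by rw [← hab, hb1, Nat.mul_one]⟩
  have hb0 : b ≠ 0 := by
    intro hb0
    rw [hb0, Nat.mul_zero] at hab
    exact hi0 hab.symm
  have hb2 : 2 ≤ b := (Nat.two_le_iff b).mpr ⟨hb0, hb1⟩
  have ham : a ≤ m := by nlinarith
  have hbm : b ≤ m := by nlinarith
  have hdvd : i ∣ M m := by
    rw [← hab]
    exact hcop.mul_dvd_of_dvd_of_dvd (dvd_M _ _ (by omega) ham) (dvd_M _ _ (by omega) hbm)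
  rw [M_succ, Nat.lcm_comm]
  exact Nat.lcm_eq_right hdvd

-- ---- port-level bridges ----

theorem pygcd_natCast (b a : Nat) : pygcd (a : Int) (b : Int) = (Nat.gcd b a : Int) := by
  induction b using Nat.strong_induction_on generalizing a with
  | _ b ih =>
    rw [pygcd]
    by_cases hb : (b : Int) = 0
    · have hb' : b = 0 := by exact_mod_cast hb
      subst hb'
      rw [dif_pos hb, Nat.gcd_zero_left]
    · have hb0 : b ≠ 0 := by omega
      rw [dif_neg hb]
      rw [PySem.Int.mod_natCast]
      rw [ih (a % b) (Nat.mod_lt a (by omega)) b]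
      rw [Nat.gcd_rec b a]

-- the trial-division loop returns the least prime factor
theorem findP_go (i : Nat) (hi : 2 ≤ i) :
    ∀ fuel d : Nat, i.minFac - d ≤ fuel → 2 ≤ d → d ≤ i.minFac →
    findP (i : Int) (d : Int) = (i.minFac : Int) := by
  have hnotp : ∀ d : Nat, ¬ ((d : Int) * d ≤ (i : Int)) → i.minFac = i ∨ d > i.minFac := by
    intro d hsq
    by_cases hpr : i.Prime
    · exact Or.inl (Nat.Prime.minFac_eq hpr)
    · right
      by_contra hle
      have hdd : d * d ≤ i := by
        have h2 := Nat.minFac_sq_le_self (n := i) (by omega) hpr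
        rw [Nat.pow_two] at h2
        have : d * d ≤ i.minFac * i.minFac := Nat.mul_le_mul (by omega) (by omega)
        omega
      exact hsq (by exact_mod_cast hdd)
  intro fuel
  induction fuel with
  | zero =>
    intro d hfuel hd2 hdm
    have hdeq : d = i.minFac := by omega
    rw [findP]
    by_cases hsq : (d : Int) * (d : Int) ≤ (i : Int)
    · rw [dif_pos hsq, PySem.Int.mod_natCast]
      have hmod : i % d = 0 := by
        rw [hdeq]
        exact Nat.mod_eq_zero_of_dvd (Nat.minFac_dvd i)
      rw [hmod]
      simp [hdeq]
    · rw [dif_neg hsq]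
      rcases hnotp d hsq with h | h
      · rw [h]
      · omega
  | succ fuel ih =>
    intro d hfuel hd2 hdm
    rw [findP]
    by_cases hsq : (d : Int) * (d : Int) ≤ (i : Int)
    · rw [dif_pos hsq, PySem.Int.mod_natCast]
      by_cases hdvd : d ∣ i
      · have hle := Nat.minFac_le_of_dvd hd2 hdvd
        have hdeq : d = i.minFac := by omega
        have hmod : i % d = 0 := Nat.mod_eq_zero_of_dvd hdvd
        rw [hmod]
        simp [hdeq]
      · have hmod : i % d ≠ 0 := fun h => hdvd (Nat.dvd_of_mod_eq_zero h)
        have hmod' : ((i % d : Nat) : Int) ≠ 0 := by exact_mod_cast hmod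
        rw [if_neg hmod']
        have hdne : d ≠ i.minFac := by
          intro h
          exact hdvd (h ▸ Nat.minFac_dvd i)
        have hrw : ((d : Int) + 1) = ((d + 1 : Nat) : Int) := by push_cast; ring
        rw [hrw]
        exact ih (d + 1) (by omega) (by omega) (by omega)
    · rw [dif_neg hsq]
      rcases hnotp d hsq with h | h
      · rw [h]
      · omega

theorem findP_eq (i : Nat) (hi : 2 ≤ i) : findP (i : Int) 2 = (i.minFac : Int) := by
  have h2 : ((2 : Nat) : Int) = (2 : Int) := by norm_num
  rw [← h2]
  exact findP_go i hi i.minFac 2 (by omega) (le_refl 2)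
    (Nat.minFac_prime (n := i) (by omega)).two_le

-- the doubling loop: result is always q times a power of p
theorem powUp_pow_mul (i q p : Int) : ∃ t : Nat, powUp i q p = q * p ^ t := by
  induction q using powUp.induct (i := i) (p := p) with
  | case1 q h ih =>
    obtain ⟨t, ht⟩ := ih
    refine ⟨t + 1, ?_⟩
    rw [powUp, dif_pos h, ht]
    ring
  | case2 q h =>
    refine ⟨0, ?_⟩
    rw [powUp, dif_neg h]
    ring

-- if i really is p^k (k ≥ 1), the loop lands exactly on i
theorem powUp_of_pow (p : Int) (hp : 2 ≤ p) (k : Nat) (hk : 1 ≤ k) :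
    ∀ fuel j : Nat, k - j ≤ fuel → 1 ≤ j → j ≤ k → powUp (p ^ k) (p ^ j) p = p ^ k := by
  intro fuel
  induction fuel with
  | zero =>
    intro j hfuel h1 h2
    have hjk : j = k := by omega
    rw [hjk, powUp]
    have hng : ¬ (p ^ k < p ^ k ∧ 2 ≤ p ∧ 1 ≤ p ^ k) := by
      rintro ⟨h, _, _⟩
      omega
    rw [dif_neg hng]
  | succ fuel ih =>
    intro j hfuel h1 h2
    by_cases hjk : j = k
    · rw [hjk, powUp]
      have hng : ¬ (p ^ k < p ^ k ∧ 2 ≤ p ∧ 1 ≤ p ^ k) := by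
        rintro ⟨h, _, _⟩
        omega
      rw [dif_neg hng]
    · have hjlt : j < k := by omega
      have hlt : p ^ j < p ^ k := by
        apply pow_lt_pow_right₀ (by omega) hjlt
      have hq1 : (1 : Int) ≤ p ^ j := one_le_pow₀ (by omega)
      rw [powUp, dif_pos ⟨hlt, hp, hq1⟩]
      rw [← pow_succ]
      exact ih (j + 1) (by omega) (by omega) (by omega)

theorem powUp_of_pow' (p : Int) (hp : 2 ≤ p) (k : Nat) (hk : 1 ≤ k) :
    powUp (p ^ k) p p = p ^ k := by
  have h := powUp_of_pow p hp k hk k 1 (by omega) (le_refl 1) hk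
  rwa [pow_one] at h

-- ---- the fold characterisations ----

def S (m : Nat) : List Int := (List.range' 1 m).map (fun j => (M j : Int))

theorem S_length (m : Nat) : (S m).length = m := by
  simp [S]

theorem S_concat (m : Nat) : S (m + 1) = S m ++ [(M (m + 1) : Int)] := by
  unfold S
  rw [List.range'_concat]
  simp [Nat.add_comm]

-- A's step applied to S m (with i = m+1 ≥ 3) appends lcm(1..m+1)
theorem stepA (m : Nat) (hm : 2 ≤ m) :
    (fun dp (i : Int) =>
      let last := PySem.List.pyGetD dp ((dp.length : Int) - 1) 0
      if PySem.Int.mod last i ≠ 0 then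
        dp ++ [PySem.Int.floordiv (last * i) (pygcd last i)]
      else
        dp ++ [last]) (S m) ((m : Int) + 1) = S (m + 1) := by
  simp only []
  have hlen : ((S m).length : Int) - 1 = ((m - 1 : Nat) : Int) := by
    rw [S_length]
    omega
  have hget : PySem.List.pyGetD (S m) (((S m).length : Int) - 1) 0 = (M m : Int) := by
    rw [hlen, PySem.List.pyGetD_natCast]
    unfold S
    rw [List.getD_eq_getElem?_getD, List.getElem?_map,
      List.getElem?_range' (by omega : m - 1 < m)]
    simp only [Option.map_some, Option.getD_some]
    have h1 : 1 + 1 * (m - 1) = m := by omega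
    rw [h1]
  rw [hget]
  have hcast : (m : Int) + 1 = ((m + 1 : Nat) : Int) := by push_cast; ring
  rw [hcast, PySem.Int.mod_natCast]
  by_cases hdvd : (m + 1) ∣ M m
  · have : M m % (m + 1) = 0 := Nat.mod_eq_zero_of_dvd hdvd
    simp only [this, Nat.cast_zero, ne_eq, not_true_eq_false, if_false]
    rw [S_concat]
    congr 2
    rw [M_succ, Nat.lcm_comm]
    exact_mod_cast (Nat.lcm_eq_right hdvd).symm
  · have hmod : M m % (m + 1) ≠ 0 := fun h => hdvd (Nat.dvd_of_mod_eq_zero h)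
    have hmod' : ((M m % (m + 1) : Nat) : Int) ≠ 0 := by exact_mod_cast hmod
    simp only [hmod', ne_eq, not_false_eq_true, if_true]
    rw [S_concat]
    congr 2
    rw [pygcd_natCast]
    have : (M m : Int) * ((m + 1 : Nat) : Int) = ((M m * (m + 1) : Nat) : Int) := by push_cast; ring
    rw [this, PySem.Int.floordiv_natCast]
    congr 1
    rw [M_succ]
    rw [Nat.lcm, Nat.gcd_comm]

-- B's step applied to (S m, M m) (with i = m+1 ≥ 3) appends lcm(1..m+1)
theorem stepB (m : Nat) (hm : 2 ≤ m) :
    (fun (st : List Int × Int) (i : Int) =>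
      let p := findP i 2
      let q := powUp i p p
      let last := if q = i then st.2 * p else st.2
      (st.1 ++ [last], last)) (S m, (M m : Int)) ((m : Int) + 1)
    = (S (m + 1), (M (m + 1) : Int)) := by
  simp only []
  have hcast : (m : Int) + 1 = ((m + 1 : Nat) : Int) := by push_cast; ring
  have hi2 : 2 ≤ m + 1 := by omega
  set i := m + 1 with hidef
  have hp : findP ((m : Int) + 1) 2 = (i.minFac : Int) := by
    rw [hcast]
    exact findP_eq i hi2
  have hpprime : i.minFac.Prime := Nat.minFac_prime (by omega)
  have hp2 : 2 ≤ i.minFac := hpprime.two_le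
  rw [hp]
  by_cases hpow : ∃ k : Nat, i = i.minFac ^ k
  · obtain ⟨k, hk⟩ := hpow
    have hk1 : 1 ≤ k := by
      rcases Nat.eq_zero_or_pos k with h | h
      · subst h; simp at hk; omega
      · exact h
    have hq : powUp ((m : Int) + 1) (i.minFac : Int) (i.minFac : Int) = (m : Int) + 1 := by
      rw [hcast]
      have hcast2 : ((i : Nat) : Int) = ((i.minFac : Int)) ^ k := by
        conv_lhs => rw [hk]
        push_cast
        ring
      rw [hcast2]
      exact powUp_of_pow' (i.minFac : Int) (by exact_mod_cast hp2) k hk1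
    rw [hq, if_pos rfl]
    have hM : M (m + 1) = M m * i.minFac := M_succ_pow hpprime hk1 hk
    have hcastM : ((M (m + 1) : Nat) : Int) = (M m : Int) * (i.minFac : Int) := by
      rw [hM]; push_cast; ring
    rw [S_concat, hcastM]
  · have hq : powUp ((m : Int) + 1) (i.minFac : Int) (i.minFac : Int) ≠ (m : Int) + 1 := by
      intro heq
      obtain ⟨t, ht⟩ := powUp_pow_mul ((m : Int) + 1) (i.minFac : Int) (i.minFac : Int)
      rw [ht] at heq
      apply hpow
      refine ⟨t + 1, ?_⟩
      have : ((i : Nat) : Int) = ((i.minFac ^ (t + 1) : Nat) : Int) := by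
        rw [← hcast, ← heq]
        push_cast
        ring
      exact_mod_cast this
    rw [if_neg hq]
    rw [S_concat]
    have hM : M (m + 1) = M m := M_succ_not_pow hi2 (by exact_mod_cast hpow)
    rw [hM]

-- both folds, by integer induction from n = 2
theorem solve_fold (n : Int) (h : 2 ≤ n) :
    solve n = S n.toNat ∧
    (PySem.List.pyRange 3 (n + 1) 1).foldl
      (fun (st : List Int × Int) i =>
        let p := findP i 2
        let q := powUp i p p
        let last := if q = i then st.2 * p else st.2
        (st.1 ++ [last], last)) ([1, 2], 2) = (S n.toNat, (M n.toNat : Int)) := by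
  induction n, h using Int.le_induction with
  | base =>
    have hnil : PySem.List.pyRange 3 (2 + 1) 1 = [] := PySem.List.pyRange_one_eq_nil (by omega)
    constructor
    · rw [solve, hnil]
      simp only [List.foldl_nil]
      decide
    · rw [hnil]
      simp only [List.foldl_nil]
      decide
  | succ n hn ih =>
    obtain ⟨ihA, ihB⟩ := ih
    have hsplit : PySem.List.pyRange 3 (n + 1 + 1) 1
        = PySem.List.pyRange 3 (n + 1) 1 ++ [n + 1] := by
      exact PySem.List.pyRange_one_succ_right (by omega)
    have hm : n = (n.toNat : Int) := by omega
    have htn : (n + 1).toNat = n.toNat + 1 := by omega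
    constructor
    · rw [solve, hsplit, List.foldl_append]
      rw [← solve]
      rw [ihA]
      rw [htn]
      have := stepA n.toNat (by omega)
      rw [← hm] at this
      simpa using this
    · rw [hsplit, List.foldl_append, ihB]
      rw [htn]
      have := stepB n.toNat (by omega)
      rw [← hm] at this
      simpa using this

-- ===== VERDICT (by name: the statement is the Claim_ definition above) =====
theorem solve_spec : Claim_equal_solve := by
  unfold Claim_equal_solve
  intro n _
  unfold Spec_solve
  by_cases h : n ≤ 2
  · have hnil : PySem.List.pyRange 3 (n + 1) 1 = [] := PySem.List.pyRange_one_eq_nil (by omega)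
    rw [solve, solve_alt, hnil]
    simp
  · have h2 : 2 ≤ n := by omega
    obtain ⟨hA, hB⟩ := solve_fold n h2
    rw [hA, solve_alt, hB]
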